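-- pv_equiv track=rewrite | github.com/ReinhardtJ/ConnectXAgent | board/value_calculation.py | value_from_grouped_connections
-- ===== SOURCE A (Python) =====
-- def value_from_grouped_connections(
--         grouped_connections,
--         value_table_
-- ):
--     value = 0
--     for axis, connections in grouped_connections.items():
--         for connection in connections:
--             if len(connection) in value_table_.keys():
--                 value += value_table_[len(connection)]
--             else:
--                 value += value_table_[4]
--
--     return value
-- ===== SOURCE B (Python) =====
-- def value_from_grouped_connections(
--         grouped_connections,
--         value_table_
-- ):
--     # Histogram pass: connection-length -> number of occurrences across all axes.
--     counts = {}
--     for connections in grouped_connections.values():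
--         for connection in connections:
--             l = len(connection)
--             counts[l] = counts.get(l, 0) + 1
--     # Scoring pass over the distinct lengths only.
--     total = 0
--     for l, c in counts.items():
--         total += c * (value_table_[l] if l in value_table_ else value_table_[4])
--     return total
-- ===== Notes on version B (the rewrite author's own statement) =====
-- stated objective: alternative
-- what changed: B first builds a frequency table mapping connection-length to its number of occurrences, then scores with a single pass over the distinct lengths (count * table value), instead of looking up the table once per individual connection.
import Mathlib
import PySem

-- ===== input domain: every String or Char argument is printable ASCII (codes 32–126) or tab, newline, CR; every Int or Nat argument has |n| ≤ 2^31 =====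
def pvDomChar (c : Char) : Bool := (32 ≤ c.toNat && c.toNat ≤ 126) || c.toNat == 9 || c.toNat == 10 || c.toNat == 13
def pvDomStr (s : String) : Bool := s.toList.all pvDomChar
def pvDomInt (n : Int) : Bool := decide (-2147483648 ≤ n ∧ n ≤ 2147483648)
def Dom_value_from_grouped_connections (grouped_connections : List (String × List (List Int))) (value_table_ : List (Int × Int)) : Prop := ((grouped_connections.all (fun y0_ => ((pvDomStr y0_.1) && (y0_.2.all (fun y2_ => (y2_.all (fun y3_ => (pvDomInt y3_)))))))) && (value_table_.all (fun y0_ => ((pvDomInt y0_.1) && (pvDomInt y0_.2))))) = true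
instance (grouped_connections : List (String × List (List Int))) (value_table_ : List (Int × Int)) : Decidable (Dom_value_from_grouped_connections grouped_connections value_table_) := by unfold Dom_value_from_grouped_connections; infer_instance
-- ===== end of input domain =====

-- B replaces per-connection table lookups by a length->count histogram scored in one pass over
-- the distinct lengths (objective: alternative decomposition, same exact result).

-- dict subscript vt[k] (first matching key's value; default 0 is never consulted inside Pre_)
def pvLookupD (vt : List (Int × Int)) (k : Int) : Int :=
  ((vt.find? (fun p => p.1 == k)).map Prod.snd).getD 0

-- ===== PORT A =====
def value_from_grouped_connections (grouped_connections : List (String × List (List Int))) (value_table_ : List (Int × Int)) : Int :=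
  grouped_connections.foldl (fun value ac =>
    ac.2.foldl (fun v c =>
      if (value_table_.find? (fun p => p.1 == (c.length : Int))).isSome then
        v + pvLookupD value_table_ (c.length : Int)
      else
        v + pvLookupD value_table_ 4) value) 0

-- ===== PORT B =====
def value_from_grouped_connections_alt (grouped_connections : List (String × List (List Int))) (value_table_ : List (Int × Int)) : Int :=
  let counts : PySem.Dict Int Int :=
    grouped_connections.foldl (fun d ac =>
      ac.2.foldl (fun d c => d.modify (c.length : Int) 0 (· + 1)) d) PySem.Dict.empty
  counts.items.foldl (fun total p =>
    total + p.2 * (if (value_table_.find? (fun q => q.1 == p.1)).isSome then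
      pvLookupD value_table_ p.1 else pvLookupD value_table_ 4)) 0

-- ===== PRECONDITION & SPEC =====
-- Pre_ excludes exactly the inputs where the Python A raises KeyError: some connection whose
-- length is absent from the table while key 4 is also absent (B raises there too).
def Pre_value_from_grouped_connections (grouped_connections : List (String × List (List Int))) (value_table_ : List (Int × Int)) : Prop :=
  ∀ p ∈ grouped_connections, ∀ c ∈ p.2,
    (∃ q ∈ value_table_, q.1 = (c.length : Int)) ∨ (∃ q ∈ value_table_, q.1 = (4 : Int))
instance (grouped_connections : List (String × List (List Int))) (value_table_ : List (Int × Int)) : Decidable (Pre_value_from_grouped_connections grouped_connections value_table_) := by unfold Pre_value_from_grouped_connections; infer_instance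
def pvWitness_value_from_grouped_connections : (List (String × List (List Int))) × (List (Int × Int)) :=
  ([("a", [[1, 2, 3], [0, 0]])], [(4, 10), (2, 1)])

def Spec_value_from_grouped_connections (grouped_connections : List (String × List (List Int))) (value_table_ : List (Int × Int)) (out : Int) : Prop := out = value_from_grouped_connections_alt grouped_connections value_table_
instance (grouped_connections : List (String × List (List Int))) (value_table_ : List (Int × Int)) (out : Int) : Decidable (Spec_value_from_grouped_connections grouped_connections value_table_ out) := by unfold Spec_value_from_grouped_connections; infer_instance

-- ===== CLAIM (what is proved, stated in full; the proofs are below) =====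
def Claim_equal_value_from_grouped_connections : Prop := ∀ (grouped_connections : List (String × List (List Int))) (value_table_ : List (Int × Int)), Dom_value_from_grouped_connections grouped_connections value_table_ → Pre_value_from_grouped_connections grouped_connections value_table_ → Spec_value_from_grouped_connections grouped_connections value_table_ (value_from_grouped_connections grouped_connections value_table_)

-- ===== LEMMAS AND PROOFS =====

-- the per-length score both programs use
def pvScore (vt : List (Int × Int)) (l : Int) : Int :=
  if (vt.find? (fun q => q.1 == l)).isSome then pvLookupD vt l else pvLookupD vt 4

-- the flattened multiset of connection lengths
def pvLens (gcs : List (String × List (List Int))) : List Int :=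
  gcs.flatMap (fun p => p.2.map (fun c => (c.length : Int)))

theorem pv_sum_if_not_mem (K : List Int) (x : Int) (g : Int → Int) (hx : x ∉ K) :
    (K.map (fun k => if k = x then g k else 0)).sum = 0 := by
  induction K with
  | nil => simp
  | cons y K ih =>
    simp only [List.mem_cons, not_or] at hx
    have hyx : ¬ y = x := fun h => hx.1 h.symm
    simp [hyx, ih hx.2]

theorem pv_sum_if_mem (K : List Int) (x : Int) (g : Int → Int) (hnd : K.Nodup) (hx : x ∈ K) :
    (K.map (fun k => if k = x then g k else 0)).sum = g x := by
  induction K with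
  | nil => simp at hx
  | cons y K ih =>
    rcases List.nodup_cons.mp hnd with ⟨hy, hnd'⟩
    by_cases hxy : y = x
    · subst hxy
      simp [pv_sum_if_not_mem K y g hy]
    · have hxK : x ∈ K := by
        rcases List.mem_cons.mp hx with h | h
        · exact absurd h.symm hxy
        · exact h
      simp [hxy, ih hnd' hxK]

-- histogram identity: summing count(k) * f k over a nodup superset of L equals summing f over L
theorem pv_hist_sum (K : List Int) (f : Int → Int) (hnd : K.Nodup) :
    ∀ (L : List Int), (∀ x ∈ L, x ∈ K) →
      (K.map (fun k => (L.count k : Int) * f k)).sum = (L.map f).sum := by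
  intro L
  induction L with
  | nil => intro _; simp
  | cons x L ih =>
    intro hL
    have hx : x ∈ K := hL x (List.mem_cons_self)
    have hL' : ∀ y ∈ L, y ∈ K := fun y hy => hL y (List.mem_cons_of_mem _ hy)
    have hsplit : (K.map (fun k => ((x :: L).count k : Int) * f k)).sum
        = (K.map (fun k => (L.count k : Int) * f k)).sum
          + (K.map (fun k => if k = x then f k else 0)).sum := by
      rw [← List.sum_map_add]
      apply congrArg
      apply List.map_congr_left
      intro k _
      by_cases hkx : k = x
      · subst hkx
        simp
        ring
      · have hxk : ¬ x = k := fun h => hkx h.symm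
        simp [hxk, hkx]
    rw [hsplit, ih hL', pv_sum_if_mem K x f hnd hx]
    simp [add_comm]

-- A's inner loop sums the scores of the connections of one axis
theorem pv_A_inner (vt : List (Int × Int)) (conns : List (List Int)) (v : Int) :
    conns.foldl (fun v c =>
      if (vt.find? (fun p => p.1 == (c.length : Int))).isSome then
        v + pvLookupD vt (c.length : Int)
      else v + pvLookupD vt 4) v
    = v + (conns.map (fun c => pvScore vt (c.length : Int))).sum := by
  induction conns generalizing v with
  | nil => simp
  | cons c conns ih =>
    by_cases h : (vt.find? (fun p => p.1 == ((c : List Int).length : Int))).isSome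
    · simp [ih, pvScore, h, add_assoc]
    · simp [ih, pvScore, h, add_assoc]

theorem pv_A_outer (vt : List (Int × Int)) (gcs : List (String × List (List Int))) (v : Int) :
    gcs.foldl (fun value ac =>
      ac.2.foldl (fun v c =>
        if (vt.find? (fun p => p.1 == (c.length : Int))).isSome then
          v + pvLookupD vt (c.length : Int)
        else v + pvLookupD vt 4) value) v
    = v + ((pvLens gcs).map (pvScore vt)).sum := by
  induction gcs generalizing v with
  | nil => simp [pvLens]
  | cons p gcs ih =>
    simp only [List.foldl_cons]
    rw [pv_A_inner, ih]
    simp [pvLens, add_assoc, Function.comp_def]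

theorem pv_A_eq (gcs : List (String × List (List Int))) (vt : List (Int × Int)) :
    value_from_grouped_connections gcs vt = ((pvLens gcs).map (pvScore vt)).sum := by
  unfold value_from_grouped_connections
  rw [pv_A_outer, zero_add]

-- B's nested counting loop is the counter of the flattened length list
theorem pv_B_counts_gen (gcs : List (String × List (List Int))) (d : PySem.Dict Int Int) :
    gcs.foldl (fun d ac =>
      ac.2.foldl (fun d c => d.modify (c.length : Int) 0 (· + 1)) d) d
    = (pvLens gcs).foldl (fun d x => d.modify x 0 (· + 1)) d := by
  induction gcs generalizing d with
  | nil => simp [pvLens]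
  | cons p gcs ih => simp [pvLens, List.foldl_append, List.foldl_map, ih]

-- B's scoring loop as a sum over the items
theorem pv_B_sum (vt : List (Int × Int)) (items : List (Int × Int)) (t : Int) :
    items.foldl (fun total p =>
      total + p.2 * (if (vt.find? (fun q => q.1 == p.1)).isSome then
        pvLookupD vt p.1 else pvLookupD vt 4)) t
    = t + (items.map (fun p => p.2 * pvScore vt p.1)).sum := by
  induction items generalizing t with
  | nil => simp
  | cons p items ih =>
    simp only [List.foldl_cons]
    rw [ih]
    simp [pvScore, add_assoc]

theorem pv_B_eq (gcs : List (String × List (List Int))) (vt : List (Int × Int)) :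
    value_from_grouped_connections_alt gcs vt
      = ((PySem.Set.ofList (pvLens gcs)).map
          (fun k => ((pvLens gcs).count k : Int) * pvScore vt k)).sum := by
  unfold value_from_grouped_connections_alt
  rw [pv_B_counts_gen, ← PySem.Dict.counter_eq_foldl, pv_B_sum, zero_add]
  simp only [PySem.Dict.items_counter, List.map_map]
  apply congrArg
  apply List.map_congr_left
  intro k _
  simp

-- ===== VERDICT (by name: the statement is the Claim_ definition above) =====
theorem value_from_grouped_connections_spec : Claim_equal_value_from_grouped_connections := by
  intro gcs vt _ _
  unfold Spec_value_from_grouped_connections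
  rw [pv_A_eq, pv_B_eq]
  exact (pv_hist_sum (PySem.Set.ofList (pvLens gcs)) (pvScore vt)
    (PySem.Set.nodup_ofList _) (pvLens gcs)
    (fun x hx => (PySem.Set.mem_ofList _ _).mpr hx)).symm
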